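-- pv_equiv track=rewrite | github.com/gavan-stil/gavhealth | backend/app/routers/new_endpoints.py | _session_category
-- ===== SOURCE A (Python) =====
-- def _session_category(categories: list[str], session_label: str | None = None) -> str:
--     """Map a list of exercise DB categories → scatter colour group.
--
--     DB categories: chest, back, shoulders, arms, legs, core, other
--     Scatter groups: push, pull, legs, abs, mixed
--     Falls back to session_label when exercise categories are ambiguous.
--     """
--     MACRO = {
--         "chest": "push", "shoulders": "push", "arms": "push",
--         "back": "pull",
--         "legs": "legs",
--         "core": "abs",
--         "other": "mixed",
--     }
--     cats = {MACRO.get(c, "mixed") for c in (categories or []) if c}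
--     cats.discard("mixed")          # ignore unknowns when deciding
--     if not cats:
--         LABEL_MAP = {"push": "push", "pull": "pull", "legs": "legs", "abs": "abs"}
--         if session_label and session_label.lower() in LABEL_MAP:
--             return LABEL_MAP[session_label.lower()]
--         return "mixed"
--     if len(cats) == 1:
--         return cats.pop()
--     return "mixed"
-- ===== SOURCE B (Python) =====
-- _GROUP = {
--     "chest": "push", "shoulders": "push", "arms": "push",
--     "back": "pull",
--     "legs": "legs",
--     "core": "abs",
-- }
--
--
-- def _session_category(categories: list[str], session_label: str | None = None) -> str:
--     """Single pass keeping one candidate group; short-circuits to 'mixed'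
--     on the second distinct group, no set is ever materialized."""
--     found = None
--     for c in (categories or []):
--         if not c:
--             continue
--         g = _GROUP.get(c)
--         if g is None:          # unknown / 'other' -> ignored
--             continue
--         if found is None:
--             found = g
--         elif g != found:
--             return "mixed"
--     if found is not None:
--         return found
--     if session_label and session_label.lower() in ("push", "pull", "legs", "abs"):
--         return session_label.lower()
--     return "mixed"
-- ===== Notes on version B (the rewrite author's own statement) =====
-- stated objective: alternative
-- what changed: Replaces the materialized set of macro groups plus cardinality check by one streaming pass keeping a single candidate group that short-circuits to 'mixed' at the second distinct group.
import Mathlib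
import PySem

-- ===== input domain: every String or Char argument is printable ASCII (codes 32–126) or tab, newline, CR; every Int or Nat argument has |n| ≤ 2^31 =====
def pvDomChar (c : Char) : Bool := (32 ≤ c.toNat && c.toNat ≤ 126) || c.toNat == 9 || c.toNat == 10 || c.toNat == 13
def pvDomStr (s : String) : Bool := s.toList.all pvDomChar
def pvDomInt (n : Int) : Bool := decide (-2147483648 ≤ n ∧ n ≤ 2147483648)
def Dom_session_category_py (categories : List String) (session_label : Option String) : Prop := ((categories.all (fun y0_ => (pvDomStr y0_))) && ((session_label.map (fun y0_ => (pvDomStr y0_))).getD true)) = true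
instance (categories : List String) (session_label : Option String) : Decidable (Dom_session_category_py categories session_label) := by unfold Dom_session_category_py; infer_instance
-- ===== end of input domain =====

-- B replaces A's set-of-groups + cardinality check by a single streaming pass with one
-- candidate group and an early 'mixed' exit; same cost, no set materialized (objective: alternative).

-- ===== PORT A =====
def pvMACRO : PySem.Dict String String :=
  PySem.Dict.ofList [("chest","push"),("shoulders","push"),("arms","push"),("back","pull"),("legs","legs"),("core","abs"),("other","mixed")]

def pvLABEL : PySem.Dict String String :=
  PySem.Dict.ofList [("push","push"),("pull","pull"),("legs","legs"),("abs","abs")]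

def session_category_py (categories : List String) (session_label : Option String) : String :=
  let cats0 : PySem.Set String :=
    categories.foldl (fun s c => if c ≠ "" then PySem.Set.add s (PySem.Dict.getD pvMACRO c "mixed") else s) PySem.Set.empty
  let cats : PySem.Set String := PySem.Set.discard cats0 "mixed"
  if cats = [] then
    match session_label with
    | some l =>
      if (!(l == "")) && PySem.Dict.contains pvLABEL (PySem.Str.lower l) then
        PySem.Dict.getD pvLABEL (PySem.Str.lower l) "mixed"   -- LABEL_MAP[k] under the membership guard
      else "mixed"
    | none => "mixed"
  else if cats.length = 1 then
    cats.headD "mixed"    -- set.pop() on a set known to have exactly one element: its unique element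
  else "mixed"

-- ===== PORT B =====
def pvGroup? (c : String) : Option String :=
  if c = "chest" ∨ c = "shoulders" ∨ c = "arms" then some "push"
  else if c = "back" then some "pull"
  else if c = "legs" then some "legs"
  else if c = "core" then some "abs"
  else none

def pvAltFallback (session_label : Option String) : String :=
  match session_label with
  | some l =>
    if (!(l == "")) && (PySem.Str.lower l == "push" || PySem.Str.lower l == "pull" ||
                        PySem.Str.lower l == "legs" || PySem.Str.lower l == "abs") then
      PySem.Str.lower l
    else "mixed"
  | none => "mixed"

def pvAltGo (cs : List String) (found : Option String) (session_label : Option String) : String :=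
  match cs with
  | [] =>
    match found with
    | some f => f
    | none => pvAltFallback session_label
  | c :: rest =>
    if c = "" then pvAltGo rest found session_label
    else
      match pvGroup? c with
      | none => pvAltGo rest found session_label
      | some g =>
        match found with
        | none => pvAltGo rest (some g) session_label
        | some f => if g = f then pvAltGo rest (some f) session_label else "mixed"

def session_category_py_alt (categories : List String) (session_label : Option String) : String :=
  pvAltGo categories none session_label

-- ===== PRECONDITION & SPEC =====
def Spec_session_category_py (categories : List String) (session_label : Option String) (out : String) : Prop := out = session_category_py_alt categories session_label
instance (categories : List String) (session_label : Option String) (out : String) : Decidable (Spec_session_category_py categories session_label out) := by unfold Spec_session_category_py; infer_instance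

-- ===== CLAIM (what is proved, stated in full; the proofs are below) =====
def Claim_equal_session_category_py : Prop := ∀ (categories : List String) (session_label : Option String), Dom_session_category_py categories session_label → Spec_session_category_py categories session_label (session_category_py categories session_label)

-- ===== LEMMAS AND PROOFS =====

-- the groups of the truthy, known, non-'other' categories, in list order
def pvGs (cats : List String) : List String :=
  cats.filterMap (fun c => if c = "" then none else pvGroup? c)

theorem pvMacro_getD (c : String) :
    PySem.Dict.getD pvMACRO c "mixed" =
      if c = "chest" then "push" else if c = "shoulders" then "push" else if c = "arms" then "push"
      else if c = "back" then "pull" else if c = "legs" then "legs" else if c = "core" then "abs"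
      else "mixed" := by
  have hitems : pvMACRO.items = [("chest","push"),("shoulders","push"),("arms","push"),("back","pull"),("legs","legs"),("core","abs"),("other","mixed")] := by decide
  simp [PySem.Dict.getD, PySem.Dict.get?, hitems, List.find?]
  split_ifs <;> simp_all [eq_comm]
  by_cases h7 : c = "other"
  · subst h7; rfl
  · have e : ∀ k : String, ¬ c = k → (k == c) = false := by
      intro k h; simp [beq_eq_false_iff_ne]; exact fun hk => h hk.symm
    rw [e "chest" (by assumption), e "shoulders" (by assumption), e "arms" (by assumption), e "back" (by assumption), e "legs" (by assumption), e "core" (by assumption), e "other" (by assumption)]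
    rfl

theorem pvMacro_cases (c : String) :
    (PySem.Dict.getD pvMACRO c "mixed" = "mixed" ∧ pvGroup? c = none) ∨
    (pvGroup? c = some (PySem.Dict.getD pvMACRO c "mixed") ∧ PySem.Dict.getD pvMACRO c "mixed" ≠ "mixed") := by
  rw [pvMacro_getD]
  unfold pvGroup?
  split_ifs <;> simp_all

theorem pv_mem_foldA (cs : List String) (s : PySem.Set String) (y : String) :
    y ∈ cs.foldl (fun s c => if c ≠ "" then PySem.Set.add s (PySem.Dict.getD pvMACRO c "mixed") else s) s ↔
      y ∈ s ∨ ∃ c ∈ cs, c ≠ "" ∧ y = PySem.Dict.getD pvMACRO c "mixed" := by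
  induction cs generalizing s with
  | nil => simp
  | cons c rest ih =>
    simp only [List.foldl_cons]
    by_cases hc : c = ""
    · subst hc
      have h0 : (if ("" : String) ≠ "" then PySem.Set.add s (PySem.Dict.getD pvMACRO "" "mixed") else s) = s := by simp
      rw [h0, ih]
      simp
    · simp only [hc, if_pos, ne_eq, not_false_iff, ih, PySem.Set.mem_add]
      constructor
      · rintro (⟨h | h⟩ | h)
        · exact Or.inl h
        · exact Or.inr ⟨c, by simp, hc, h⟩
        · obtain ⟨d, hd, hdn, hy⟩ := h
          exact Or.inr ⟨d, by simp [hd], hdn, hy⟩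
      · rintro (h | ⟨d, hd, hdn, hy⟩)
        · exact Or.inl (Or.inl h)
        · rcases List.mem_cons.mp hd with rfl | hd
          · exact Or.inl (Or.inr hy)
          · exact Or.inr ⟨d, hd, hdn, hy⟩

theorem pv_nodup_foldA (cs : List String) (s : PySem.Set String) (hs : s.Nodup) :
    (cs.foldl (fun s c => if c ≠ "" then PySem.Set.add s (PySem.Dict.getD pvMACRO c "mixed") else s) s).Nodup := by
  induction cs generalizing s with
  | nil => exact hs
  | cons c rest ih =>
    simp only [List.foldl_cons]
    by_cases hc : c = ""
    · simp only [hc]; exact ih _ (by simpa using hs)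
    · exact ih _ (by simp only [hc, ne_eq, not_false_iff, if_true]; exact PySem.Set.nodup_add _ _ hs)

theorem pv_mem_gs (cats : List String) (y : String) :
    y ∈ pvGs cats ↔ ∃ c ∈ cats, c ≠ "" ∧ y = PySem.Dict.getD pvMACRO c "mixed" ∧ y ≠ "mixed" := by
  unfold pvGs
  rw [List.mem_filterMap]
  constructor
  · rintro ⟨c, hc, hf⟩
    by_cases h : c = ""
    · simp [h] at hf
    · simp only [h, if_false] at hf
      rcases pvMacro_cases c with ⟨_, hn⟩ | ⟨hg, hne⟩
      · rw [hn] at hf; cases hf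
      · rw [hg] at hf; cases hf; exact ⟨c, hc, h, rfl, hne⟩
  · rintro ⟨c, hc, h, hy, hne⟩
    refine ⟨c, hc, ?_⟩
    rcases pvMacro_cases c with ⟨hm, _⟩ | ⟨hg, _⟩
    · exact absurd (hy.trans hm) hne
    · simp [h, hg, hy]

theorem pvLabel_fallback (k : String) :
    (if PySem.Dict.contains pvLABEL k then PySem.Dict.getD pvLABEL k "mixed" else "mixed")
      = (if (k == "push" || k == "pull" || k == "legs" || k == "abs") then k else "mixed") := by
  by_cases h1 : k = "push"
  · subst h1; rfl
  by_cases h2 : k = "pull"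
  · subst h2; rfl
  by_cases h3 : k = "legs"
  · subst h3; rfl
  by_cases h4 : k = "abs"
  · subst h4; rfl
  have e : ∀ a : String, ¬ k = a → (a == k) = false := by
    intro a h; simp [beq_eq_false_iff_ne]; exact fun hk => h hk.symm
  have e' : ∀ a : String, ¬ k = a → (k == a) = false := by
    intro a h; simp [beq_eq_false_iff_ne]; exact h
  simp [PySem.Dict.contains, show pvLABEL.items = [("push","push"),("pull","pull"),("legs","legs"),("abs","abs")] from rfl,
        e "push" h1, e "pull" h2, e "legs" h3, e "abs" h4, e' "push" h1, e' "pull" h2, e' "legs" h3, e' "abs" h4]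

theorem pv_fallback_eq (sl : Option String) :
    (match sl with
     | some l =>
       if (!(l == "")) && PySem.Dict.contains pvLABEL (PySem.Str.lower l) then
         PySem.Dict.getD pvLABEL (PySem.Str.lower l) "mixed"
       else "mixed"
     | none => "mixed") = pvAltFallback sl := by
  cases sl with
  | none => rfl
  | some l =>
    unfold pvAltFallback
    by_cases hl : l = ""
    · simp [hl]
    · have h := pvLabel_fallback (PySem.Str.lower l)
      simp only [hl] at *
      split_ifs at h ⊢ <;> simp_all

theorem pvAltGo_some (cs : List String) (f : String) (sl : Option String) :
    pvAltGo cs (some f) sl = if (pvGs cs).all (· == f) then f else "mixed" := by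
  induction cs with
  | nil => simp [pvAltGo, pvGs]
  | cons c rest ih =>
    unfold pvAltGo pvGs
    by_cases hc : c = ""
    · simpa [hc, pvGs] using ih
    · simp only [hc, if_neg, if_false]
      cases hg : pvGroup? c with
      | none => simpa [pvGs, List.filterMap_cons, hc, hg] using ih
      | some g =>
        simp only [List.filterMap_cons, hc, if_false, hg, List.all_cons]
        by_cases hgf : g = f
        · simpa [hgf, pvGs] using ih
        · simp [hgf, show (g == f) = false by simp [hgf]]

theorem pvAltGo_none (cs : List String) (sl : Option String) :
    pvAltGo cs none sl =
      match pvGs cs with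
      | [] => pvAltFallback sl
      | g :: rest => if rest.all (· == g) then g else "mixed" := by
  induction cs with
  | nil => simp [pvAltGo, pvGs]
  | cons c rest ih =>
    unfold pvAltGo
    by_cases hc : c = ""
    · rw [if_pos hc, ih]
      simp [pvGs, List.filterMap_cons, hc]
    · rw [if_neg hc]
      cases hg : pvGroup? c with
      | none =>
        rw [ih]
        simp [pvGs, List.filterMap_cons, hc, hg]
      | some g =>
        dsimp only
        rw [pvAltGo_some]
        simp [pvGs, List.filterMap_cons, hc, hg]

theorem pv_singleton (S : List String) (g : String) (hnd : S.Nodup) (hg : g ∈ S)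
    (hall : ∀ y ∈ S, y = g) : S = [g] := by
  cases S with
  | nil => cases hg
  | cons a t =>
    have ha : a = g := hall a (by simp)
    subst ha
    cases t with
    | nil => rfl
    | cons b u =>
      have hb : b = a := hall b (by simp)
      subst hb
      simp at hnd

-- ===== VERDICT (by name: the statement is the Claim_ definition above) =====
theorem session_category_py_spec : Claim_equal_session_category_py := by
  unfold Claim_equal_session_category_py Spec_session_category_py
  intro categories sl _
  unfold session_category_py session_category_py_alt
  simp only []
  set S := PySem.Set.discard (categories.foldl (fun s c => if c ≠ "" then PySem.Set.add s (PySem.Dict.getD pvMACRO c "mixed") else s) PySem.Set.empty) "mixed" with hS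
  have hmem : ∀ y, y ∈ S ↔ y ∈ pvGs categories := by
    intro y
    rw [hS, PySem.Set.mem_discard, pv_mem_foldA, pv_mem_gs]
    simp [PySem.Set.empty]
    tauto
  have hnd : S.Nodup := PySem.Set.nodup_discard _ _ (pv_nodup_foldA categories PySem.Set.empty (by simp [PySem.Set.empty]))
  rw [pvAltGo_none]
  cases hgs : pvGs categories with
  | nil =>
    have hSnil : S = [] := by
      rw [List.eq_nil_iff_forall_not_mem]
      intro y hy
      rw [hmem y, hgs] at hy
      cases hy
    rw [if_pos hSnil]
    exact pv_fallback_eq sl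
  | cons g grest =>
    have hgS : g ∈ S := (hmem g).mpr (by rw [hgs]; simp)
    have hSne : ¬ S = [] := by intro h; rw [h] at hgS; cases hgS
    rw [if_neg hSne]
    by_cases hall : grest.all (· == g)
    · have hallS : ∀ y ∈ S, y = g := by
        intro y hy
        rw [hmem y, hgs] at hy
        rcases List.mem_cons.mp hy with rfl | hy
        · rfl
        · exact beq_iff_eq.mp (List.all_eq_true.mp hall y hy)
      have : S = [g] := pv_singleton S g hnd hgS hallS
      rw [this]
      simp [hall]
    · obtain ⟨x, hx, hxg⟩ : ∃ x ∈ grest, ¬ x = g := by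
        have h : ¬ ∀ x ∈ grest, (x == g) = true := by simpa [List.all_eq_true] using hall
        rcases Classical.not_forall.mp h with ⟨x, hx⟩
        rcases Classical.not_imp.mp hx with ⟨hxm, hxe⟩
        exact ⟨x, hxm, by simpa using hxe⟩
      have hxS : x ∈ S := (hmem x).mpr (by rw [hgs]; simp [hx])
      have hlen : ¬ S.length = 1 := by
        intro h
        obtain ⟨y, hy⟩ := List.length_eq_one_iff.mp h
        rw [hy] at hgS hxS
        simp at hgS hxS
        exact hxg (hxS.trans hgS.symm)
      rw [if_neg hlen]
      simp [hall]
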